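-- pv_equiv track=rewrite | github.com/manas-17045/LeetcodeSolutions | Leetcode 3801-3900/3839/3839.py | prefixConnected
-- ===== SOURCE A (Python) =====
-- def prefixConnected(words: list[str], k: int) -> int:
--     """
--     Calculates the number of groups where at least two words share the same prefix of length k.
--
--     :param words: A list of strings to evaluate.
--     :param k: The required length of the prefix to be considered for grouping.
--     :return: The total count of unique prefixes of length k that appear in at least two words.
--     """
--     prefixCounts = {}
--     for currentWord in words:
--         if len(currentWord) >= k:
--             currentPrefix = currentWord[:k]
--             prefixCounts[currentPrefix] = prefixCounts.get(currentPrefix, 0) + 1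
--
--     totalGroups = 0
--     for countValue in prefixCounts.values():
--         if countValue >= 2:
--             totalGroups += 1
--
--     return totalGroups
-- ===== SOURCE B (Python) =====
-- def prefixConnected(words: list[str], k: int) -> int:
--     """Sort the k-prefixes, then count runs of length >= 2 in one scan."""
--     prefixes = sorted(w[:k] for w in words if len(w) >= k)
--     total = 0
--     i = 0
--     n = len(prefixes)
--     while i < n:
--         j = i + 1
--         while j < n and prefixes[j] == prefixes[i]:
--             j += 1
--         if j - i >= 2:
--             total += 1
--         i = j
--     return total
-- ===== Notes on version B (the rewrite author's own statement) =====
-- stated objective: alternative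
-- what changed: Replaces A's prefix-counting dictionary and second pass over its values by collecting the k-prefixes, sorting them, and counting runs of length >= 2 in one scan over the sorted list.
import Mathlib
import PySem

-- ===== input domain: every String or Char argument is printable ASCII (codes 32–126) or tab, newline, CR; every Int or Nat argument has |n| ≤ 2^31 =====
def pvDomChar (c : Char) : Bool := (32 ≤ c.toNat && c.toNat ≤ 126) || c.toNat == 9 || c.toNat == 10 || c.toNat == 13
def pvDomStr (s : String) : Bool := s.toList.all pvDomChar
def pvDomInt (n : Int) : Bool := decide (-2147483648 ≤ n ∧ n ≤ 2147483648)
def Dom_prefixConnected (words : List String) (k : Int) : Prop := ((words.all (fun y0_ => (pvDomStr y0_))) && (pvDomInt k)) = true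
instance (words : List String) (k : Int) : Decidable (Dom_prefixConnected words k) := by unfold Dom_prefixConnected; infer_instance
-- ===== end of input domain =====

-- B replaces A's counting dictionary by sort-the-prefixes-then-count-runs (alternative decomposition, same asymptotic cost class).

-- ===== PORT A =====
def prefixConnected (words : List String) (k : Int) : Int :=
  let prefixCounts := words.foldl
    (fun d currentWord =>
      if k ≤ PySem.Str.len currentWord then
        let currentPrefix := PySem.Str.slice currentWord none (some k)
        d.insert currentPrefix (d.getD currentPrefix 0 + 1)
      else d)
    (PySem.Dict.empty : PySem.Dict String Int)
  prefixCounts.values.foldl (fun totalGroups countValue =>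
    if 2 ≤ countValue then totalGroups + 1 else totalGroups) 0

-- ===== PORT B =====
-- the two nested while loops of Source B: scan the run of elements equal to the head, then continue after it
def pvRunScan : List String → Int
  | [] => 0
  | x :: rest =>
      (if (2 : Int) ≤ ((rest.takeWhile (fun y => y == x)).length : Int) + 1 then 1 else 0)
        + pvRunScan (rest.dropWhile (fun y => y == x))
termination_by l => l.length
decreasing_by
  simp only [List.length_cons]
  exact Nat.lt_succ_of_le (List.length_dropWhile_le _ _)

def prefixConnected_alt (words : List String) (k : Int) : Int :=
  let prefixes := PySem.List.sorted
    ((words.filter (fun w => k ≤ PySem.Str.len w)).map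
      (fun w => PySem.Str.slice w none (some k)))
    (fun x => x) false
  pvRunScan prefixes

-- ===== PRECONDITION & SPEC =====
def Spec_prefixConnected (words : List String) (k : Int) (out : Int) : Prop := out = prefixConnected_alt words k
instance (words : List String) (k : Int) (out : Int) : Decidable (Spec_prefixConnected words k out) := by unfold Spec_prefixConnected; infer_instance

-- ===== CLAIM (what is proved, stated in full; the proofs are below) =====
def Claim_equal_prefixConnected : Prop := ∀ (words : List String) (k : Int), Dom_prefixConnected words k → Spec_prefixConnected words k (prefixConnected words k)

-- ===== LEMMAS AND PROOFS =====

-- the common value: number of distinct elements of P occurring at least twice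
def pvSpecCount (P : List String) : Nat :=
  (P.toFinset.filter (fun x => 2 ≤ P.count x)).card

lemma pvSpecCount_perm {P Q : List String} (h : P.Perm Q) : pvSpecCount P = pvSpecCount Q := by
  unfold pvSpecCount
  rw [List.toFinset_eq_of_perm P Q h]
  congr 1
  apply Finset.filter_congr
  intro x _
  simp [h.count_eq]

-- A's guarded counting loop is the plain counting loop over the filtered-and-mapped prefix list
lemma pvA_fold (k : Int) (words : List String) (d : PySem.Dict String Int) :
    words.foldl
      (fun d currentWord =>
        if k ≤ PySem.Str.len currentWord then
          d.insert (PySem.Str.slice currentWord none (some k))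
            (d.getD (PySem.Str.slice currentWord none (some k)) 0 + 1)
        else d) d
      = ((words.filter (fun w => k ≤ PySem.Str.len w)).map
          (fun w => PySem.Str.slice w none (some k))).foldl
          (fun d p => d.insert p (d.getD p 0 + 1)) d := by
  induction words generalizing d with
  | nil => rfl
  | cons w ws ih =>
      simp only [List.foldl_cons, List.filter_cons]
      by_cases hw : k ≤ PySem.Str.len w
      · simp only [hw, decide_true, if_true, List.map_cons, List.foldl_cons]
        exact ih _
      · simp only [hw, decide_false, if_false]
        exact ih _

-- A computes pvSpecCount of the prefix list
lemma pvA_eq (P : List String) :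
    (PySem.Dict.counter P).values.foldl
      (fun t c => if 2 ≤ c then t + 1 else t) 0 = (pvSpecCount P : Int) := by
  have hvals : (PySem.Dict.counter P).values
      = (PySem.Set.ofList P).map (fun x => (P.count x : Int)) := by
    show ((PySem.Dict.counter P).items.map Prod.snd) = _
    rw [PySem.Dict.items_counter]
    simp [List.map_map, Function.comp]
  rw [hvals, PySem.List.foldl_ite_add_one]
  simp only [List.countP_map, zero_add]
  have hset : ((PySem.Set.ofList P).countP
      (fun x => decide (2 ≤ (P.count x : Int)))) = pvSpecCount P := by
    have hnd : (PySem.Set.ofList P : List String).Nodup := PySem.Set.nodup_ofList P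
    unfold pvSpecCount
    rw [List.countP_eq_length_filter]
    have hnd2 : ((PySem.Set.ofList P : List String).filter
        (fun x => decide (2 ≤ (P.count x : Int)))).Nodup := hnd.filter _
    rw [← List.toFinset_card_of_nodup hnd2]
    congr 1
    ext y
    simp only [List.mem_toFinset, List.mem_filter, Finset.mem_filter,
      PySem.Set.mem_ofList, decide_eq_true_eq]
    constructor
    · rintro ⟨hy, hc⟩; exact ⟨hy, by exact_mod_cast hc⟩
    · rintro ⟨hy, hc⟩; exact ⟨hy, by exact_mod_cast hc⟩
  simpa [Function.comp_def] using hset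

lemma pvDropWhile_head_false {α : Type} (p : α → Bool) :
    ∀ (l : List α) {z : α} {zs : List α}, l.dropWhile p = z :: zs → p z = false := by
  intro l
  induction l with
  | nil => intro z zs h; simp at h
  | cons x xs ih =>
      intro z zs h
      by_cases hx : p x
      · rw [List.dropWhile_cons_of_pos hx] at h; exact ih h
      · rw [List.dropWhile_cons_of_neg hx] at h
        cases h; simpa using hx

-- B's run scan computes pvSpecCount on a sorted list
lemma pvRunScan_sorted (Q : List String) (h : Q.Pairwise (· ≤ ·)) :
    pvRunScan Q = (pvSpecCount Q : Int) := by
  induction Q using pvRunScan.induct with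
  | case1 => simp [pvRunScan, pvSpecCount]
  | case2 x rest ih =>
      set run := rest.takeWhile (fun y => y == x) with hrundef
      set restAfter := rest.dropWhile (fun y => y == x) with hradef
      have hrest : rest.Pairwise (· ≤ ·) := (List.pairwise_cons.1 h).2
      have hle : ∀ y ∈ rest, x ≤ y := (List.pairwise_cons.1 h).1
      have hsplit : run ++ restAfter = rest := by
        rw [hrundef, hradef]; exact List.takeWhile_append_dropWhile
      have hrun : ∀ y ∈ run, y = x := by
        intro y hy
        have := List.mem_takeWhile_imp hy
        simpa using this
      have hafter_gt : ∀ y ∈ restAfter, x < y := by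
        intro y hy
        cases hra : restAfter with
        | nil => rw [hra] at hy; simp at hy
        | cons z zs =>
            have hz : (z == x) = false :=
              pvDropWhile_head_false (fun y => y == x) rest (by rw [← hradef]; exact hra)
            have hzmem : z ∈ rest := by
              rw [← hsplit, hra]; simp
            have hxz : x < z := lt_of_le_of_ne (hle z hzmem) (Ne.symm (by simpa using hz))
            rw [hra] at hy
            rcases List.mem_cons.1 hy with rfl | hy'
            · exact hxz
            · have hzs : restAfter.Pairwise (· ≤ ·) :=
                hrest.sublist (List.dropWhile_sublist _)
              rw [hra] at hzs
              exact lt_of_lt_of_le hxz ((List.pairwise_cons.1 hzs).1 y hy')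
      have hxnot : x ∉ restAfter := fun hx => lt_irrefl x (hafter_gt x hx)
      have hafter_pair : restAfter.Pairwise (· ≤ ·) :=
        hrest.sublist (List.dropWhile_sublist _)
      have hcountx : (x :: rest).count x = 1 + run.length := by
        rw [← hsplit]
        simp only [List.count_cons_self, List.count_append]
        have h1 : run.count x = run.length :=
          List.count_eq_length.2 (fun y hy => (hrun y hy).symm)
        have h2 : restAfter.count x = 0 := List.count_eq_zero.2 hxnot
        omega
      have hcounty : ∀ y ∈ restAfter, (x :: rest).count y = restAfter.count y := by
        intro y hy
        have hyx : y ≠ x := fun hyx => lt_irrefl x (hyx ▸ hafter_gt y hy)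
        rw [← hsplit]
        simp only [List.count_cons, List.count_append]
        have h1 : run.count y = 0 :=
          List.count_eq_zero.2 (fun hyr => hyx (hrun y hyr))
        simp [h1, Ne.symm hyx]
      have hfin : (x :: rest).toFinset = insert x restAfter.toFinset := by
        ext y
        simp only [List.mem_toFinset, List.mem_cons, Finset.mem_insert]
        constructor
        · rintro (rfl | hy)
          · exact Or.inl rfl
          · rw [← hsplit] at hy
            rcases List.mem_append.1 hy with hy | hy
            · exact Or.inl (hrun y hy)
            · exact Or.inr hy
        · rintro (rfl | hy)
          · exact Or.inl rfl
          · right; rw [← hsplit]; exact List.mem_append.2 (Or.inr hy)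
      have hspec : pvSpecCount (x :: rest)
          = (if 2 ≤ 1 + run.length then 1 else 0) + pvSpecCount restAfter := by
        unfold pvSpecCount
        rw [hfin, Finset.filter_insert]
        have hcongr : restAfter.toFinset.filter (fun y => 2 ≤ (x :: rest).count y)
            = restAfter.toFinset.filter (fun y => 2 ≤ restAfter.count y) := by
          apply Finset.filter_congr
          intro y hy
          simp [hcounty y (List.mem_toFinset.1 hy)]
        have hxnotf : x ∉ restAfter.toFinset.filter (fun y => 2 ≤ (x :: rest).count y) := by
          simp only [Finset.mem_filter, List.mem_toFinset]
          rintro ⟨hx, -⟩; exact hxnot hx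
        by_cases hc : 2 ≤ (x :: rest).count x
        · rw [if_pos hc, Finset.card_insert_of_notMem hxnotf, hcongr,
            if_pos (by omega : 2 ≤ 1 + run.length)]
          · omega
        · rw [if_neg hc, hcongr, if_neg (by omega : ¬ 2 ≤ 1 + run.length)]
          omega
      rw [pvRunScan, ← hrundef, ← hradef, ih hafter_pair, hspec]
      push_cast
      split_ifs with h1 h2 h2 <;> omega

-- ===== VERDICT (by name: the statement is the Claim_ definition above) =====
theorem prefixConnected_spec : Claim_equal_prefixConnected := by
  intro words k _
  unfold Spec_prefixConnected prefixConnected prefixConnected_alt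
  dsimp only
  rw [pvA_fold k words PySem.Dict.empty, PySem.Dict.foldl_insert_getD_add_one_eq_counter, pvA_eq]
  rw [pvRunScan_sorted _ (by
    simpa using PySem.List.sorted_pairwise
      (xs := (words.filter (fun w => k ≤ PySem.Str.len w)).map
        (fun w => PySem.Str.slice w none (some k))) (key := fun x => x))]
  exact_mod_cast (pvSpecCount_perm (PySem.List.sorted_perm
    ((words.filter (fun w => k ≤ PySem.Str.len w)).map
      (fun w => PySem.Str.slice w none (some k))) (fun x => x) false)).symm
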